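-- pv_equiv track=rewrite | github.com/MoKangMedical/medi-slim | app.py | extract_attribution
-- ===== SOURCE A (Python) =====
-- ATTRIBUTION_KEYS = [
--     "ref",
--     "utm_source",
--     "utm_medium",
--     "utm_campaign",
--     "utm_content",
--     "utm_term",
--     "source",
--     "landing_path",
-- ]
--
-- def extract_attribution(data):
--     attribution = {}
--     for key in ATTRIBUTION_KEYS:
--         value = data.get(key, "")
--         if isinstance(value, str):
--             value = value.strip()
--         if value:
--             attribution[key] = value
--     return attribution
-- ===== SOURCE B (Python) =====
-- ATTRIBUTION_KEYS = [
--     "ref",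
--     "utm_source",
--     "utm_medium",
--     "utm_campaign",
--     "utm_content",
--     "utm_term",
--     "source",
--     "landing_path",
-- ]
--
-- _KEYSET = set(ATTRIBUTION_KEYS)
--
-- def extract_attribution(data):
--     # one pass over the input collecting stripped candidates, then one
--     # comprehension re-ordering them by the canonical key order
--     found = {}
--     for key, value in data.items():
--         if key in _KEYSET and key not in found:
--             found[key] = value.strip() if isinstance(value, str) else value
--     return {key: found[key] for key in ATTRIBUTION_KEYS if key in found and found[key]}
-- ===== Notes on version B (the rewrite author's own statement) =====
-- stated objective: alternative
-- what changed: B scans data.items() once, collecting stripped values for attribution keys into an index dict, then emits them with a comprehension over ATTRIBUTION_KEYS, instead of A's per-key dict.get loop over the fixed key list.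
import Mathlib
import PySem

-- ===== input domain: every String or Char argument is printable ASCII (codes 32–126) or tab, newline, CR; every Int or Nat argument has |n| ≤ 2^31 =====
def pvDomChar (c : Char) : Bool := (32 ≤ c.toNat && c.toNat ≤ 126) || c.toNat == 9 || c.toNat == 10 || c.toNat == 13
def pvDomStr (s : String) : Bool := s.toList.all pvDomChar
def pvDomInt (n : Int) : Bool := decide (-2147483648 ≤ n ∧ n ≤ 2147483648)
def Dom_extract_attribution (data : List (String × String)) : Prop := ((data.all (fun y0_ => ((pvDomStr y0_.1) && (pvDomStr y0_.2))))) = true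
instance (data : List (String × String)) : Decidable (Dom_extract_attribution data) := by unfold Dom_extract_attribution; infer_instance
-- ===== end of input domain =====

-- B builds an index of stripped candidate values in one pass over the input,
-- then emits them in canonical key order; A does a per-key lookup over the fixed key list.

-- ===== PORT A =====
def ATTRIBUTION_KEYS : List String :=
  ["ref", "utm_source", "utm_medium", "utm_campaign", "utm_content", "utm_term",
   "source", "landing_path"]

-- data.get(key, "") on the dict-as-association-list: first match, default "".
def pvDictGetD (data : List (String × String)) (key : String) : String :=
  ((data.find? (fun kv => kv.1 == key)).map (fun kv => kv.2)).getD ""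

-- attribution[key] = value appends: the iterated keys are distinct, so a fresh
-- key is appended exactly as Python's dict insertion does.
def extract_attribution (data : List (String × String)) : List (String × String) :=
  ATTRIBUTION_KEYS.foldl (fun attribution key =>
    let value := pvDictGetD data key          -- value = data.get(key, "")
    let value := PySem.Str.strip value        -- value = value.strip()  (always a str here)
    if value ≠ "" then attribution ++ [(key, value)] else attribution) []

-- ===== PORT B =====
def pvKEYSET : PySem.Set String := PySem.Set.ofList ATTRIBUTION_KEYS

def extract_attribution_alt (data : List (String × String)) : List (String × String) :=
  -- for key, value in data.items(): if key in _KEYSET and key not in found: found[key] = value.strip()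
  let found : PySem.Dict String String :=
    data.foldl (fun found kv =>
      if PySem.Set.contains pvKEYSET kv.1 && !(found.contains kv.1) then
        found.insert kv.1 (PySem.Str.strip kv.2)
      else found) PySem.Dict.empty
  -- {key: found[key] for key in ATTRIBUTION_KEYS if key in found and found[key]}
  ATTRIBUTION_KEYS.foldl (fun out key =>
    match found.get? key with
    | some v => if v ≠ "" then out ++ [(key, v)] else out
    | none => out) []

-- ===== PRECONDITION & SPEC =====
def Spec_extract_attribution (data : List (String × String)) (out : List (String × String)) : Prop := out = extract_attribution_alt data
instance (data : List (String × String)) (out : List (String × String)) : Decidable (Spec_extract_attribution data out) := by unfold Spec_extract_attribution; infer_instance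

-- ===== CLAIM (what is proved, stated in full; the proofs are below) =====
def Claim_equal_extract_attribution : Prop := ∀ (data : List (String × String)), Dom_extract_attribution data → Spec_extract_attribution data (extract_attribution data)

-- ===== LEMMAS AND PROOFS =====

-- The index built by B's first pass answers, for a key the set contains, exactly
-- the first match in data (stripped); keys already present in the accumulator keep their value.
lemma found_get? (data : List (String × String)) (acc : PySem.Dict String String) (k : String) :
    (data.foldl (fun found kv =>
      if PySem.Set.contains pvKEYSET kv.1 && !(found.contains kv.1) then
        found.insert kv.1 (PySem.Str.strip kv.2)
      else found) acc).get? k =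
    if acc.contains k then acc.get? k
    else if PySem.Set.contains pvKEYSET k then
      ((data.find? (fun kv => kv.1 == k)).map (fun kv => PySem.Str.strip kv.2))
    else none := by
  induction data generalizing acc with
  | nil =>
    simp only [List.foldl_nil, List.find?_nil, Option.map_none]
    by_cases h : acc.contains k = true
    · rw [if_pos h]
    · rw [if_neg h, (PySem.Dict.get?_eq_none_iff_contains acc k).mpr (by simp [h])]
      split_ifs <;> rfl
  | cons kv rest ih =>
    simp only [List.foldl_cons, List.find?_cons]
    rw [ih]
    by_cases hcond : (PySem.Set.contains pvKEYSET kv.1 && !(acc.contains kv.1)) = true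
    · rw [if_pos hcond]
      simp only [Bool.and_eq_true, Bool.not_eq_true'] at hcond
      obtain ⟨hin, hnc⟩ := hcond
      rw [PySem.Dict.contains_insert, PySem.Dict.get?_insert]
      by_cases hk : k = kv.1
      · subst hk
        have hin' : kv.1 ∈ pvKEYSET := by simpa using hin
        simp [hnc, hin']
      · have hbeq : (kv.1 == k) = false := by simp [Ne.symm hk]
        simp [hk, hbeq]
    · rw [if_neg hcond]
      by_cases hk : kv.1 = k
      · subst hk
        by_cases hc : acc.contains kv.1 = true
        · simp [hc]
        · have hks : kv.1 ∉ pvKEYSET := by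
            intro hmem
            exact hcond (by simp [hc, PySem.Set.contains, hmem])
          simp [hc, hks]
      · have hbeq : (kv.1 == k) = false := by simp [hk]
        simp [hbeq]

-- ===== VERDICT (by name: the statement is the Claim_ definition above) =====
theorem extract_attribution_spec : Claim_equal_extract_attribution := by
  intro data _
  show extract_attribution data = extract_attribution_alt data
  simp only [extract_attribution, extract_attribution_alt]
  refine PySem.List.foldl_congr_mem' _ _ _ _ ?_
  intro key hkey out
  have hset : PySem.Set.contains pvKEYSET key = true := by
    fin_cases hkey <;> decide
  rw [found_get?]
  simp only [PySem.Dict.contains_empty, Bool.false_eq_true, if_false, hset, if_true]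
  cases hfind : data.find? (fun kv => kv.1 == key) with
  | none =>
    have h0 : PySem.Str.strip "" = "" := by decide
    simp [pvDictGetD, hfind, h0]
  | some kv => simp [pvDictGetD, hfind]
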